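-- pv_equiv track=rewrite | github.com/Seojeil/Algorithm_Practice | python/081-090/082 - 광물 캐기.py | solution
-- ===== SOURCE A (Python) =====
-- def solution(picks, minerals):
--     answer = 0
--     fatigue = [[0, 0, 0] for _ in range(len(minerals) // 5 + 1)]
--     fatigue_rules = [[1, 1, 1], [5, 1, 1], [25, 5, 1]]
--
--     for i, v in enumerate(minerals):
--         if v == "diamond":
--             fatigue[i // 5][0] += 1
--         elif v == "iron":
--             fatigue[i // 5][1] += 1
--         else:
--             fatigue[i // 5][2] += 1
--
--     fatigue = fatigue[: sum(picks)]
--     fatigue.sort(key=lambda a: (a[0], a[1], a[2]))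
--
--     for i, pick in enumerate(picks):
--         for _ in range(pick):
--             if not fatigue:
--                 break
--
--             mine = fatigue.pop()
--
--             for j, m in enumerate(mine):
--                 answer += fatigue_rules[i][j] * m
--
--     return answer
-- ===== SOURCE B (Python) =====
-- def solution(picks, minerals):
--     # Count minerals into groups of five, exactly by position.
--     groups = [[0, 0, 0] for _ in range(len(minerals) // 5 + 1)]
--     for i, v in enumerate(minerals):
--         if v == "diamond":
--             groups[i // 5][0] += 1
--         elif v == "iron":
--             groups[i // 5][1] += 1
--         else:
--             groups[i // 5][2] += 1
--
--     # Only the first sum(picks) groups are reachable; sort them ascending.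
--     groups = sorted(groups[: sum(picks)], key=lambda g: (g[0], g[1], g[2]))
--
--     rules = [[1, 1, 1], [5, 1, 1], [25, 5, 1]]
--     total = 0
--     remaining = len(groups)
--     # Pick type i consumes a contiguous block from the top (costliest) end.
--     for rule, pick in zip(rules, picks):
--         take = min(max(pick, 0), remaining)
--         for d, fe, st in groups[remaining - take : remaining]:
--             total += rule[0] * d + rule[1] * fe + rule[2] * st
--         remaining -= take
--     return total
-- ===== Notes on version B (the rewrite author's own statement) =====
-- stated objective: simpler
-- what changed: B replaces A's pop-from-a-mutated-list simulation (inner range(pick) loop with break, popping one group per fatigue-row update) by direct contiguous block assignment: after the same count-and-sort, each pick type takes one slice of min(pick, remaining) groups from the costly end of the ascending sort via zip(rules, picks), so there is no list mutation and no per-iteration emptiness check; B also never indexes the rules table out of range.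
import Mathlib
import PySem

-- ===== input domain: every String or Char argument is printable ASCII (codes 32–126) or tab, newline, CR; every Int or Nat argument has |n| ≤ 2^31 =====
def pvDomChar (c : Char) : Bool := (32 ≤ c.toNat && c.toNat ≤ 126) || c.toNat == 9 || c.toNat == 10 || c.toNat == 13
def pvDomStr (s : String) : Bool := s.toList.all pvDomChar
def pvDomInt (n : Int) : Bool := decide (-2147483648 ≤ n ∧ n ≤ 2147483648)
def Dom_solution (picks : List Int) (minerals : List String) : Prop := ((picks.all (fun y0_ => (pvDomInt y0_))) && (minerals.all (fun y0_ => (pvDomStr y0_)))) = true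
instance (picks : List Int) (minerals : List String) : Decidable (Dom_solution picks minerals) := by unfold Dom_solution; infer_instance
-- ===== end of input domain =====

-- B replaces A's pop-one-group-at-a-time loop (with break) by contiguous block assignment per
-- pick type (zip + slice from the costly end of the same ascending sort); same cost, simpler.

-- ===== PORT A =====
-- shared helpers: both Pythons build the per-5-group counts with the identical loop, use the
-- identical sort key and the identical per-group cost expression, so these are one transliteration.
-- Python's sort key is the tuple (g[0], g[1], g[2]); each group counts at most 5 minerals, so every
-- component lies in [0,5] and lexicographic tuple order coincides with the order of the packed
-- integer 36*g0 + 6*g1 + g2 — the key is ported as that Int (exact on every reachable list).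
def keyG (g : Int × Int × Int) : Int := 36 * g.1 + 6 * g.2.1 + g.2.2

-- answer += rules_row[0]*m0 + rules_row[1]*m1 + rules_row[2]*m2  (the j-loop over the 3 components)
def mineVal (r g : Int × Int × Int) : Int := r.1 * g.1 + r.2.1 * g.2.1 + r.2.2 * g.2.2

-- fatigue = [[0,0,0] for _ in range(len(minerals)//5+1)]; for i, v in enumerate(minerals): bump fatigue[i//5]
def countGroups (minerals : List String) : List (Int × Int × Int) :=
  (PySem.List.enumerate minerals).foldl
    (fun f p =>
      let idx := PySem.Int.floordiv p.1 5
      let g := PySem.List.pyGetD f idx (0, 0, 0)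
      let g' := if p.2 = "diamond" then (g.1 + 1, g.2.1, g.2.2)
                else if p.2 = "iron" then (g.1, g.2.1 + 1, g.2.2)
                else (g.1, g.2.1, g.2.2 + 1)
      PySem.List.pySetD f idx g')
    (List.replicate (minerals.length / 5 + 1) ((0 : Int), (0 : Int), (0 : Int)))

def fatigueRules : List (Int × Int × Int) := [(1, 1, 1), (5, 1, 1), (25, 5, 1)]

-- fatigue_rules[i]; for i ∉ [0,3) Python raises IndexError (excluded by Pre_solution) — the
-- total default (0,0,0) is only ever taken outside Pre_solution.
def ruleRow (i : Int) : Int × Int × Int := PySem.List.pyGetD fatigueRules i (0, 0, 0)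

-- 'for _ in range(pick): if not fatigue: break; mine = fatigue.pop(); answer += …' — the bounded
-- for-loop with break, as fuel recursion that stops exactly where the break fires.
def innerA (r : Int × Int × Int) : Nat → Int × List (Int × Int × Int) → Int × List (Int × Int × Int)
  | 0, st => st
  | k + 1, st =>
    if st.2.isEmpty then st
    else
      match PySem.List.pop? st.2 with
      | some mr => innerA r k (st.1 + mineVal r mr.1, mr.2)
      | none => st

def solution (picks : List Int) (minerals : List String) : Int :=
  let fatigue := PySem.List.sorted (PySem.List.slice (countGroups minerals) none (some picks.sum)) keyG
  ((PySem.List.enumerate picks).foldl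
      (fun st ip => innerA (ruleRow ip.1) ip.2.toNat st)
      ((0 : Int), fatigue)).1

-- ===== PORT B =====
-- total, remaining loop body: take = min(max(pick,0), remaining); sum rules over the block
-- groups[remaining-take : remaining]; remaining -= take
def stepB (groups : List (Int × Int × Int)) (st : Int × Int) (rp : (Int × Int × Int) × Int) :
    Int × Int :=
  let take := min (max rp.2 0) st.2
  let block := PySem.List.slice groups (some (st.2 - take)) (some st.2)
  (st.1 + block.foldl (fun acc g => acc + mineVal rp.1 g) 0, st.2 - take)

def solution_alt (picks : List Int) (minerals : List String) : Int :=
  let groups := PySem.List.sorted (PySem.List.slice (countGroups minerals) none (some picks.sum)) keyG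
  ((fatigueRules.zip picks).foldl (stepB groups) ((0 : Int), (groups.length : Int))).1

-- ===== PRECONDITION & SPEC =====
-- number of groups surviving the slice fatigue[:sum(picks)] (Python slice-clamp arithmetic)
def pvAvail (picks : List Int) (minerals : List String) : Int :=
  let n : Int := ((minerals.length / 5 + 1 : Nat) : Int)
  let s := picks.sum
  if s < 0 then max (n + s) 0 else min s n

-- Pre_ excludes exactly the inputs where A raises IndexError: a pick entry at index ≥ 3 that is
-- positive while sorted groups are still left when it is reached (fatigue_rules[i] is out of range).
def Pre_solution (picks : List Int) (minerals : List String) : Prop :=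
  ∀ i : Nat, i < picks.length → 3 ≤ i → 0 < picks.getD i 0 →
    pvAvail picks minerals ≤ ((picks.take i).map (fun p => max p 0)).sum
instance (picks : List Int) (minerals : List String) : Decidable (Pre_solution picks minerals) := by
  unfold Pre_solution; infer_instance

def pvWitness_solution : List Int × List String :=
  ([2, 1, 1], ["diamond", "iron", "stone", "stone", "iron", "diamond"])

def Spec_solution (picks : List Int) (minerals : List String) (out : Int) : Prop := out = solution_alt picks minerals
instance (picks : List Int) (minerals : List String) (out : Int) : Decidable (Spec_solution picks minerals out) := by unfold Spec_solution; infer_instance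

-- ===== CLAIM (what is proved, stated in full; the proofs are below) =====
def Claim_equal_solution : Prop := ∀ (picks : List Int) (minerals : List String), Dom_solution picks minerals → Pre_solution picks minerals → Spec_solution picks minerals (solution picks minerals)

-- ===== LEMMAS AND PROOFS =====

def segSum (r : Int × Int × Int) (l : List (Int × Int × Int)) : Int := (l.map (mineVal r)).sum

theorem innerA_nil (r : Int × Int × Int) (k : Nat) (ans : Int) :
    innerA r k (ans, []) = (ans, []) := by
  cases k <;> simp [innerA]

theorem pop?_append (ys : List (Int × Int × Int)) (y : Int × Int × Int) :
    PySem.List.pop? (ys ++ [y]) (-1) = some (y, ys) := by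
  simp [PySem.List.pop?, PySem.List.pyIdx?]
  rw [List.eraseIdx_append_of_length_le (le_refl _)]; simp

theorem innerA_eq (r : Int × Int × Int) (k : Nat) (ans : Int) (f : List (Int × Int × Int)) :
    innerA r k (ans, f) =
      (ans + segSum r (f.drop (f.length - min k f.length)),
       f.take (f.length - min k f.length)) := by
  induction k generalizing ans f with
  | zero => simp [innerA, segSum]
  | succ k ih =>
    rcases eq_or_ne f [] with rfl | hf
    · simp [innerA, segSum]
    · obtain ⟨ys, y, rfl⟩ : ∃ ys y, f = ys ++ [y] :=
        ⟨f.dropLast, f.getLast hf, (List.dropLast_append_getLast hf).symm⟩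
      have hne : ((ys ++ [y]).isEmpty) = false := by simp
      rw [innerA, hne]
      simp only [Bool.false_eq_true, if_false, pop?_append]
      rw [ih]
      have hlen : (ys ++ [y]).length = ys.length + 1 := by simp
      set n := ys.length with hn
      have hsub : n + 1 - min (k + 1) (n + 1) = n - min k n := by omega
      have hle : n - min k n ≤ n := by omega
      rw [Prod.mk.injEq]
      constructor
      · show ans + mineVal r y + segSum r (ys.drop (n - min k n)) = _
        rw [hlen, hsub]
        rw [List.drop_append_of_le_length hle]
        simp [segSum]
        ring
      · show ys.take (n - min k n) = _
        rw [hlen, hsub, List.take_append_of_le_length hle]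

theorem countGroups_aux (l : List (Int × String)) (init : List (Int × Int × Int)) :
    (l.foldl
      (fun f p =>
        let idx := PySem.Int.floordiv p.1 5
        let g := PySem.List.pyGetD f idx (0, 0, 0)
        let g' := if p.2 = "diamond" then (g.1 + 1, g.2.1, g.2.2)
                  else if p.2 = "iron" then (g.1, g.2.1 + 1, g.2.2)
                  else (g.1, g.2.1, g.2.2 + 1)
        PySem.List.pySetD f idx g') init).length = init.length := by
  induction l generalizing init with
  | nil => rfl
  | cons x xs ih => simp only [List.foldl_cons, ih, PySem.List.length_pySetD]

theorem length_countGroups (minerals : List String) :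
    (countGroups minerals).length = minerals.length / 5 + 1 := by
  unfold countGroups
  rw [countGroups_aux]
  simp

theorem avail_eq (picks : List Int) (minerals : List String) :
    pvAvail picks minerals =
      ((PySem.List.sorted (PySem.List.slice (countGroups minerals) none (some picks.sum)) keyG).length : Int) := by
  rw [PySem.List.length_sorted]
  unfold pvAvail
  have hn := length_countGroups minerals
  rcases lt_or_ge picks.sum 0 with hs | hs
  · have hk : picks.sum = -(((-picks.sum).toNat : Nat) : Int) := by omega
    rw [if_pos hs, hk, PySem.List.slice_to_neg_natCast _ _ (by omega)]
    simp only [List.length_take, hn]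
    omega
  · rw [if_neg (by omega), PySem.List.slice_to _ hs]
    simp only [List.length_take, hn]
    omega

theorem stepA_corr (L : List (Int × Int × Int)) (r : Nat) (hr : r ≤ L.length)
    (row : Int × Int × Int) (p ans : Int) :
    innerA row p.toNat (ans, L.take r) =
      (ans + segSum row ((L.drop (r - p.toNat)).take (r - (r - p.toNat))),
       L.take (r - p.toNat)) := by
  rw [innerA_eq]
  have hl : (L.take r).length = r := by simp; omega
  rw [hl]
  have h1 : r - min p.toNat r = r - p.toNat := by omega
  rw [h1, Prod.mk.injEq]
  constructor
  · rw [List.drop_take]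
  · rw [List.take_take]
    congr 1
    omega

theorem stepB_corr (L : List (Int × Int × Int)) (r : Nat)
    (row : Int × Int × Int) (p ans : Int) :
    stepB L (ans, (r : Int)) (row, p) =
      (ans + segSum row ((L.drop (r - p.toNat)).take (r - (r - p.toNat))),
       ((r - p.toNat : Nat) : Int)) := by
  unfold stepB
  have h1 : min (max p 0) (r : Int) = ((min p.toNat r : Nat) : Int) := by omega
  have h2 : (r : Int) - min (max p 0) (r : Int) = ((r - p.toNat : Nat) : Int) := by omega
  simp only [h2, PySem.List.slice_natCast, PySem.List.foldl_add, zero_add]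
  rfl

theorem tail_nonpos (rest : List Int) (s : Int) (st : Int × List (Int × Int × Int))
    (h : ∀ p ∈ rest, p ≤ 0) :
    (PySem.List.enumerate rest s).foldl (fun st ip => innerA (ruleRow ip.1) ip.2.toNat st) st
      = st := by
  induction rest generalizing s st with
  | nil => rfl
  | cons p rest ih =>
    rw [PySem.List.enumerate_cons, List.foldl_cons]
    have hp : p.toNat = 0 := by
      have := h p (List.mem_cons_self)
      omega
    rw [hp]
    exact ih (s + 1) st (fun q hq => h q (List.mem_cons_of_mem _ hq))

theorem tail_nil (rest : List Int) (s ans : Int) :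
    (PySem.List.enumerate rest s).foldl (fun st ip => innerA (ruleRow ip.1) ip.2.toNat st)
      (ans, []) = (ans, []) := by
  induction rest generalizing s with
  | nil => rfl
  | cons p rest ih =>
    rw [PySem.List.enumerate_cons, List.foldl_cons, innerA_nil]
    exact ih (s + 1)

theorem sum_max_nonpos (l : List Int) (h : ∀ p ∈ l, p ≤ 0) :
    (l.map (fun p => max p 0)).sum = 0 := by
  apply List.sum_eq_zero
  intro x hx
  obtain ⟨p, hp, rfl⟩ := List.mem_map.1 hx
  have := h p hp
  omega

-- ===== VERDICT (by name: the statement is the Claim_ definition above) =====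
theorem solution_spec : Claim_equal_solution := by
  intro picks minerals _ hpre
  unfold Spec_solution solution solution_alt
  have havail := avail_eq picks minerals
  rcases picks with _ | ⟨a, _ | ⟨b, _ | ⟨c, rest⟩⟩⟩
  · rfl
  · -- picks = [a]
    dsimp only
    rw [show ((0:Int), PySem.List.sorted (PySem.List.slice (countGroups minerals) none (some [a].sum)) keyG) = ((0:Int), (PySem.List.sorted (PySem.List.slice (countGroups minerals) none (some [a].sum)) keyG).take (PySem.List.sorted (PySem.List.slice (countGroups minerals) none (some [a].sum)) keyG).length) from by rw [List.take_length]]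
    simp only [PySem.List.enumerate_cons, PySem.List.enumerate_nil, List.foldl_cons,
      List.foldl_nil, fatigueRules, List.zip_cons_cons, List.zip_nil_right]
    rw [stepA_corr _ _ (le_refl _), stepB_corr]
    rfl
  · -- picks = [a, b]
    dsimp only
    rw [show ((0:Int), PySem.List.sorted (PySem.List.slice (countGroups minerals) none (some [a, b].sum)) keyG) = ((0:Int), (PySem.List.sorted (PySem.List.slice (countGroups minerals) none (some [a, b].sum)) keyG).take (PySem.List.sorted (PySem.List.slice (countGroups minerals) none (some [a, b].sum)) keyG).length) from by rw [List.take_length]]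
    simp only [PySem.List.enumerate_cons, PySem.List.enumerate_nil, List.foldl_cons,
      List.foldl_nil, fatigueRules, List.zip_cons_cons, List.zip_nil_right]
    rw [stepA_corr _ _ (le_refl _), stepA_corr _ _ (Nat.sub_le _ _), stepB_corr, stepB_corr]
    rfl
  · -- picks = a :: b :: c :: rest
    dsimp only
    set L := PySem.List.sorted (PySem.List.slice (countGroups minerals) none (some (a :: b :: c :: rest).sum)) keyG with hLdef
    rw [show ((0:Int), L) = ((0:Int), L.take L.length) from by rw [List.take_length]]
    set n := L.length with hn
    simp only [PySem.List.enumerate_cons, List.foldl_cons, fatigueRules,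
      List.zip_cons_cons, List.zip_nil_left, List.foldl_nil]
    rw [stepA_corr _ _ (le_refl _), stepA_corr _ _ (Nat.sub_le _ _),
      stepA_corr _ _ ((Nat.sub_le _ _).trans (Nat.sub_le _ _)),
      stepB_corr, stepB_corr, stepB_corr]
    by_cases hall : ∀ p ∈ rest, p ≤ 0
    · rw [tail_nonpos _ _ _ hall]
      rfl
    · push Not at hall
      obtain ⟨p, hp, hppos⟩ := hall
      have hex : ∃ j, j < rest.length ∧ 0 < rest.getD j 0 := by
        obtain ⟨j, hj, rfl⟩ := List.mem_iff_getElem.1 hp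
        exact ⟨j, hj, by rw [List.getD_eq_getElem _ _ hj]; omega⟩
      obtain ⟨hj0len, hj0pos⟩ := Nat.find_spec hex
      set j0 := Nat.find hex with hj0def
      have htk : ∀ q ∈ rest.take j0, q ≤ 0 := by
        intro q hq
        obtain ⟨j, hjlen, hjq⟩ := List.mem_iff_getElem.1 hq
        simp only [List.length_take] at hjlen
        have hj1 : j < j0 := by omega
        have hj2 : j < rest.length := by omega
        have hnot := Nat.find_min hex hj1
        have : ¬ 0 < rest.getD j 0 := fun hcon => hnot ⟨hj2, hcon⟩
        rw [List.getD_eq_getElem _ _ hj2] at this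
        rw [List.getElem_take] at hjq
        omega
      have hg3 : (a :: b :: c :: rest).getD (3 + j0) 0 = rest.getD j0 0 := by
        rw [show 3 + j0 = j0 + 1 + 1 + 1 from by omega]
        simp
      have htake : (a :: b :: c :: rest).take (3 + j0) = a :: b :: c :: rest.take j0 := by
        rw [show 3 + j0 = j0 + 1 + 1 + 1 from by omega]
        simp [List.take_succ_cons]
      have hpre3 := hpre (3 + j0) (by simp; omega) (by omega) (by rw [hg3]; exact hj0pos)
      rw [htake] at hpre3
      simp only [List.map_cons, List.sum_cons, sum_max_nonpos _ htk, add_zero] at hpre3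
      rw [havail] at hpre3
      have hz : L.length - a.toNat - b.toNat - c.toNat = 0 := by rw [← hn]; omega
      rw [hz, List.take_zero, tail_nil]
      rfl
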